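-- pv_equiv track=rewrite | github.com/MWittweiler/citation_analysis | citation_analysis.py | tokenizer_2
-- ===== SOURCE A (Python) =====
-- from typing import List, Tuple, Any, Dict, Set, Union
--
-- def tokenizer_2(text: str) -> List[str]:
--     """
--     Simple tokenizer that splits text into words based on specified punctuation characters.
--
--     Args:
--         text (str): The string to tokenize.
--
--     Returns:
--         List[str]: A list of words from the input string.
--     """
--     wort = ''
--     worttrennung = ' —?!-,.()[]:;\'\/\"”“„'
--     listetext = []
--     text = text + '.'
--     for k in text:
--         if k not in worttrennung:
--             wort = wort + k
--         else:
--             if len(wort) > 0: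
--                 listetext.append(wort)
--                 wort = ''
--     return listetext
-- ===== SOURCE B (Python) =====
-- from typing import List
--
-- def tokenizer_2(text: str) -> List[str]:
--     """Two-pointer scan: skip delimiter runs, slice out each maximal word run."""
--     delims = set(' —?!-,.()[]:;\'\\/"”“„')
--     tokens = []
--     i, n = 0, len(text)
--     while i < n:
--         if text[i] in delims:
--             i += 1
--         else:
--             j = i
--             while j < n and text[j] not in delims:
--                 j += 1
--             tokens.append(text[i:j])
--             i = j
--     return tokens
-- ===== Notes on version B (the rewrite author's own statement) =====
-- stated objective: alternative
-- what changed: Replaced A's per-character accumulator loop (with a sentinel '.' appended to flush the last word) by a two-pointer scan that skips delimiters and emits each maximal word run as one slice, with no sentinel and no incremental string building.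
import Mathlib
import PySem

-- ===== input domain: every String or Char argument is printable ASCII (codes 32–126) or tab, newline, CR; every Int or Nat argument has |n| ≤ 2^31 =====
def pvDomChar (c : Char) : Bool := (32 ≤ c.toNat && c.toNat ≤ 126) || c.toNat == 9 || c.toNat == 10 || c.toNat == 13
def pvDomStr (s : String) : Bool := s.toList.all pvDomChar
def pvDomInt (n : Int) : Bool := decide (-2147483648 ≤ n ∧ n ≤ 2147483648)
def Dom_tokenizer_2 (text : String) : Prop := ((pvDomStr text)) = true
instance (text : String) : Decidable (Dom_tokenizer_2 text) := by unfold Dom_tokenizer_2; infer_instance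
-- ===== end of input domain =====

-- B replaces A's per-character accumulator loop (plus a sentinel '.' to flush the last
-- word) by a two-pointer run scan: skip a delimiter, or slice out a maximal word run.

-- ===== PORT A =====
-- Python's ' —?!-,.()[]:;\'\/\"”“„' keeps the backslash of the unknown escape \/ :
def wtA : List Char := " —?!-,.()[]:;'\\/\"”“„".toList

-- 'k in worttrennung'
def inWt (k : Char) : Bool := wtA.contains k

-- one loop step over the wort/listetext state, exactly A's branches
def stepA (st : List Char × List String) (k : Char) : List Char × List String :=
  if ¬ inWt k then (st.1 ++ [k], st.2)
  else if st.1.length > 0 then ([], st.2 ++ [String.mk st.1]) else (st.1, st.2)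

def tokenizer_2 (text : String) : List String :=
  ((text.toList ++ ['.']).foldl stepA ([], [])).2

-- ===== PORT B =====
-- 'text[i] in delims' (same delimiter set, backslash included)
def isDelim (c : Char) : Bool := (" —?!-,.()[]:;'\\/\"”“„".toList).contains c

-- outer while: step past one delimiter, or take a whole word run (the inner
-- while/slice text[i:j] is the takeWhile/dropWhile split) and continue after it
def scanRuns : List Char → List String
  | [] => []
  | c :: cs =>
    if isDelim c then scanRuns cs
    else
      String.mk (c :: cs.takeWhile (fun x => !isDelim x)) ::
        scanRuns (cs.dropWhile (fun x => !isDelim x))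
termination_by l => l.length
decreasing_by
  · simp
  · have := List.length_dropWhile_le (p := fun x => !isDelim x) (l := cs)
    simp; omega

def tokenizer_2_alt (text : String) : List String := scanRuns text.toList

-- ===== PRECONDITION & SPEC =====
def Spec_tokenizer_2 (text : String) (out : List String) : Prop := out = tokenizer_2_alt text
instance (text : String) (out : List String) : Decidable (Spec_tokenizer_2 text out) := by unfold Spec_tokenizer_2; infer_instance

-- ===== CLAIM (what is proved, stated in full; the proofs are below) =====
def Claim_equal_tokenizer_2 : Prop := ∀ (text : String), Dom_tokenizer_2 text → Spec_tokenizer_2 text (tokenizer_2 text)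

-- ===== LEMMAS AND PROOFS =====

theorem inWt_eq : inWt = isDelim := rfl

theorem takeWhile_nd (as : List Char) (h : ∀ x ∈ as, isDelim x = false) :
    as.takeWhile (fun x => !isDelim x) = as :=
  List.takeWhile_eq_self_iff.mpr (by intro x hx; simp [h x hx])

theorem dropWhile_nd (as : List Char) (h : ∀ x ∈ as, isDelim x = false) :
    as.dropWhile (fun x => !isDelim x) = [] :=
  List.dropWhile_eq_nil_iff.mpr (by intro x hx; simp [h x hx])

-- a delimiter-free list scans to its single word (or nothing if empty)
theorem scanRuns_nondelim (acc : List Char) (h : ∀ x ∈ acc, isDelim x = false) :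
    scanRuns acc = if acc.isEmpty then [] else [String.mk acc] := by
  cases acc with
  | nil => simp [scanRuns]
  | cons a as =>
    have ha := h a (by simp)
    have h' : ∀ x ∈ as, isDelim x = false := fun x hx => h x (by simp [hx])
    rw [scanRuns, if_neg (by simp [ha]), takeWhile_nd as h', dropWhile_nd as h']
    simp [scanRuns]

-- flushing a pending delimiter-free word at a delimiter
theorem scanRuns_flush (acc : List Char) (c : Char) (cs : List Char)
    (h : ∀ x ∈ acc, isDelim x = false) (hc : isDelim c = true) :
    scanRuns (acc ++ c :: cs) =
      (if acc.isEmpty then [] else [String.mk acc]) ++ scanRuns cs := by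
  cases acc with
  | nil =>
    rw [List.nil_append, scanRuns, if_pos hc]; simp
  | cons a as =>
    have ha := h a (by simp)
    have h' : ∀ x ∈ as, isDelim x = false := fun x hx => h x (by simp [hx])
    rw [List.cons_append, scanRuns, if_neg (by simp [ha])]
    have ht : (as ++ c :: cs).takeWhile (fun x => !isDelim x) = as := by
      rw [List.takeWhile_append_of_pos (by intro x hx; simp [h' x hx]),
          List.takeWhile_cons, if_neg (by simp [hc])]
      simp
    have hd : (as ++ c :: cs).dropWhile (fun x => !isDelim x) = c :: cs := by
      rw [List.dropWhile_append_of_pos (by intro x hx; simp [h' x hx]),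
          List.dropWhile_cons, if_neg (by simp [hc])]
    rw [ht, hd, scanRuns, if_pos hc]
    simp

-- loop invariant: folding A's step over l then the final '.' flush equals B's scan
theorem foldA_eq (l : List Char) : ∀ (acc : List Char) (out : List String),
    (∀ x ∈ acc, isDelim x = false) →
    ((l ++ ['.']).foldl stepA (acc, out)).2 = out ++ scanRuns (acc ++ l) := by
  induction l with
  | nil =>
    intro acc out h
    have hdot : isDelim '.' = true := by decide
    simp only [List.nil_append, List.foldl_cons, List.foldl_nil, stepA, inWt_eq, hdot,
      not_true, if_neg (by simp : ¬ (False : Prop))]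
    rw [List.append_nil, scanRuns_nondelim acc h]
    by_cases he : acc = []
    · subst he; simp
    · have : acc.length > 0 := by cases acc <;> simp_all
      simp [this, List.isEmpty_iff, he]
  | cons c cs ih =>
    intro acc out h
    simp only [List.cons_append, List.foldl_cons]
    by_cases hc : isDelim c = true
    · rw [show stepA (acc, out) c
            = if acc.length > 0 then ([], out ++ [String.mk acc]) else (acc, out) by
          rw [stepA, inWt_eq, hc]; simp]
      by_cases he : acc = []
      · subst he
        simp only [List.length_nil, gt_iff_lt, lt_irrefl, if_false]
        rw [ih [] out (by simp), scanRuns_flush [] c cs (by simp) hc]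
        simp
      · have hl : acc.length > 0 := by cases acc <;> simp_all
        simp only [hl, if_true]
        rw [ih [] (out ++ [String.mk acc]) (by simp),
            scanRuns_flush acc c cs h hc]
        simp [List.isEmpty_iff, he]
    · rw [show stepA (acc, out) c = (acc ++ [c], out) by rw [stepA, inWt_eq]; simp [hc]]
      rw [ih (acc ++ [c]) out ?_]
      · simp
      · intro x hx
        rcases List.mem_append.mp hx with h1 | h1
        · exact h x h1
        · simp at h1; subst h1; simpa using hc

-- ===== VERDICT (by name: the statement is the Claim_ definition above) =====
theorem tokenizer_2_spec : Claim_equal_tokenizer_2 := by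
  intro text _
  unfold Spec_tokenizer_2 tokenizer_2 tokenizer_2_alt
  simpa using foldA_eq text.toList [] [] (by simp)
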